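-- pv_equiv track=rewrite | github.com/Netrion-29/Netrion-cerebralos | cerebralos/_archive/2026-02-20/validation/build_audit_pack.py | _section_consultant_coverage
-- ===== SOURCE A (Python) =====
-- from typing import Any, Dict, List, Optional, Set, Tuple
--
-- def _section_consultant_coverage(features: Dict) -> List[str]:
--     """Section 5: consultant coverage from notes_by_service."""
--     lines = ["=" * 70, "5) CONSULTANT COVERAGE (notes_by_service)", "=" * 70]
--     days = features.get("days", {})
--     day_keys = sorted(days.keys())
--
--     # Collect all service names across all days
--     all_services: Set[str] = set()
--     for day_iso in day_keys:
--         nbs = days[day_iso].get("services", {}).get("notes_by_service", {})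
--         all_services.update(nbs.keys())
--
--     service_list = sorted(all_services - {"_untagged"})
--     if not service_list:
--         lines.append("  (no tagged services found)")
--         lines.append("")
--         return lines
--
--     # Header
--     header = f"  {'Day':12s}"
--     for svc in service_list:
--         header += f"  {svc:>15s}"
--     lines.append(header)
--     lines.append("  " + "-" * (12 + 17 * len(service_list)))
--
--     for day_iso in day_keys:
--         nbs = days[day_iso].get("services", {}).get("notes_by_service", {})
--         row = f"  {day_iso:12s}"
--         for svc in service_list:
--             cnt = len(nbs.get(svc, []))
--             row += f"  {cnt if cnt else '.':>15}"
--         lines.append(row)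
--
--     # Totals
--     row = f"  {'TOTAL':12s}"
--     for svc in service_list:
--         total = sum(
--             len(days[d].get("services", {}).get("notes_by_service", {}).get(svc, []))
--             for d in day_keys
--         )
--         row += f"  {total:>15d}"
--     lines.append(row)
--     lines.append("")
--     return lines
-- ===== SOURCE B (Python) =====
-- def _section_consultant_coverage(features):
--     """Section 5: consultant coverage from notes_by_service."""
--     lines = ["=" * 70, "5) CONSULTANT COVERAGE (notes_by_service)", "=" * 70]
--     days = features.get("days", {})
--     day_keys = sorted(days.keys())
--     nbs_by_day = [days[d].get("services", {}).get("notes_by_service", {}) for d in day_keys]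
--
--     all_services = set()
--     for nbs in nbs_by_day:
--         all_services.update(nbs.keys())
--     service_list = sorted(all_services - {"_untagged"})
--     if not service_list:
--         return lines + ["  (no tagged services found)", ""]
--
--     lines.append("  " + "Day".ljust(12) + "".join("  " + s.rjust(15) for s in service_list))
--     lines.append("  " + "-" * (12 + 17 * len(service_list)))
--
--     # single pass: per-day counts feed both the row and the running totals
--     totals = [0] * len(service_list)
--     for d, nbs in zip(day_keys, nbs_by_day):
--         counts = [len(nbs.get(svc, [])) for svc in service_list]
--         totals = [t + c for t, c in zip(totals, counts)]
--         lines.append("  " + d.ljust(12) + "".join("  " + (str(c) if c else ".").rjust(15) for c in counts))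
--     lines.append("  " + "TOTAL".ljust(12) + "".join("  " + str(t).rjust(15) for t in totals))
--     lines.append("")
--     return lines
-- ===== Notes on version B (the rewrite author's own statement) =====
-- stated objective: alternative
-- what changed: B computes each day's per-service counts once and accumulates the TOTAL row as a running vector sum in the same single pass over days (with the notes_by_service dicts extracted once up front), instead of A's separate totals loop that re-walks all days and re-derives the nested dicts for every service.
import Mathlib
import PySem

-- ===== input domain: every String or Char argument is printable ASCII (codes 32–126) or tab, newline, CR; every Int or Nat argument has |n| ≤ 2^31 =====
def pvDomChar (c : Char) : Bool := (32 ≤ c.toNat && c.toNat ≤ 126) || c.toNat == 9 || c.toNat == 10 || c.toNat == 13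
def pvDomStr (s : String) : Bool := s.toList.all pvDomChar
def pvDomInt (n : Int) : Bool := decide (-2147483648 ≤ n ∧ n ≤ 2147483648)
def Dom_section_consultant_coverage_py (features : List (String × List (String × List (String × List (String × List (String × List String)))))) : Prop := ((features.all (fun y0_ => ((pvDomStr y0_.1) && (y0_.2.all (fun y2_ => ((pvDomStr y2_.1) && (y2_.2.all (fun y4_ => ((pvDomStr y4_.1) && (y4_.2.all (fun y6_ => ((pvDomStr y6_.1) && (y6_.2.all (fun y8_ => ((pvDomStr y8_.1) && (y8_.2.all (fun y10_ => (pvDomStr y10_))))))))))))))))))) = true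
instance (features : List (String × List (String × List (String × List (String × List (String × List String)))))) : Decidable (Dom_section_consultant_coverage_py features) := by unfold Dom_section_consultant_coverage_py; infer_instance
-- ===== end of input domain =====

-- B builds each row's counts once and accumulates the TOTAL row in the same pass (running vector sum)
-- instead of A's separate nested re-scan of all days per service; format specs are identical.

-- shared small helpers (both Pythons use the same field access and the same format specs)
-- days[d].get("services", {}).get("notes_by_service", {})  — d is always a present key, so .getD d [] is exact
def pvNbs (dayVal : List (String × List (String × List (String × List String)))) : PySem.Dict String (List String) :=
  PySem.Dict.ofList ((PySem.Dict.ofList ((PySem.Dict.ofList dayVal).getD "services" [])).getD "notes_by_service" [])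

-- f"{s:12s}" / s.ljust(12): left-justify, space pad (exact: Python pads with spaces, no truncation)
def padRchars (cs : List Char) (w : Nat) : List Char := cs ++ List.replicate (w - cs.length) ' '
-- f"{s:>15s}" / s.rjust(15)
def padLchars (cs : List Char) (w : Nat) : List Char := List.replicate (w - cs.length) ' ' ++ cs
-- f"  {cnt if cnt else '.':>15}"
def pvCell (cnt : Int) : List Char := ' ' :: ' ' :: padLchars (if cnt = 0 then ['.'] else PySem.Int.toChars cnt) 15
-- f"  {total:>15d}"
def pvTCell (t : Int) : List Char := ' ' :: ' ' :: padLchars (PySem.Int.toChars t) 15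

-- ===== PORT A =====
def section_consultant_coverage_py (features : List (String × List (String × List (String × List (String × List (String × List String)))))) : List String :=
  let lines : List String := [String.ofList (List.replicate 70 '='), "5) CONSULTANT COVERAGE (notes_by_service)", String.ofList (List.replicate 70 '=')]
  let days := PySem.Dict.ofList ((PySem.Dict.ofList features).getD "days" [])
  let dayKeys := PySem.List.sorted days.keys (fun x => x) false
  let allServices : PySem.Set String :=
    dayKeys.foldl (fun s d => PySem.Set.update s (pvNbs (days.getD d [])).keys) PySem.Set.empty
  let serviceList := PySem.List.sorted (PySem.Set.diff allServices ["_untagged"]) (fun x => x) false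
  if serviceList = [] then lines ++ ["  (no tagged services found)", ""]
  else
    let header := serviceList.foldl (fun h svc => h ++ ' ' :: ' ' :: padLchars svc.toList 15)
      (' ' :: ' ' :: padRchars "Day".toList 12)
    let lines := lines ++ [String.ofList header, String.ofList (' ' :: ' ' :: List.replicate (12 + 17 * serviceList.length) '-')]
    let lines := dayKeys.foldl (fun ls d =>
      let nbs := pvNbs (days.getD d [])
      ls ++ [String.ofList (serviceList.foldl (fun r svc => r ++ pvCell ((nbs.getD svc []).length : Int))
        (' ' :: ' ' :: padRchars d.toList 12))]) lines
    let totalRow := serviceList.foldl (fun r svc =>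
      r ++ pvTCell ((dayKeys.map (fun d => (((pvNbs (days.getD d [])).getD svc []).length : Int))).sum))
      (' ' :: ' ' :: padRchars "TOTAL".toList 12)
    lines ++ [String.ofList totalRow, ""]

-- ===== PORT B =====
def section_consultant_coverage_py_alt (features : List (String × List (String × List (String × List (String × List (String × List String)))))) : List String :=
  let lines : List String := [String.ofList (List.replicate 70 '='), "5) CONSULTANT COVERAGE (notes_by_service)", String.ofList (List.replicate 70 '=')]
  let days := PySem.Dict.ofList ((PySem.Dict.ofList features).getD "days" [])
  let dayKeys := PySem.List.sorted days.keys (fun x => x) false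
  let nbsByDay := dayKeys.map (fun d => pvNbs (days.getD d []))
  let allServices : PySem.Set String :=
    nbsByDay.foldl (fun s nbs => PySem.Set.update s nbs.keys) PySem.Set.empty
  let serviceList := PySem.List.sorted (PySem.Set.diff allServices ["_untagged"]) (fun x => x) false
  if serviceList = [] then lines ++ ["  (no tagged services found)", ""]
  else
    let lines := lines ++
      [String.ofList (' ' :: ' ' :: padRchars "Day".toList 12 ++ (serviceList.map (fun s => ' ' :: ' ' :: padLchars s.toList 15)).flatten),
       String.ofList (' ' :: ' ' :: List.replicate (12 + 17 * serviceList.length) '-')]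
    let res := (dayKeys.zip nbsByDay).foldl (fun (acc : List Int × List String) p =>
        let counts := serviceList.map (fun svc => ((p.2.getD svc []).length : Int))
        ((acc.1.zip counts).map (fun q => q.1 + q.2),
         acc.2 ++ [String.ofList (' ' :: ' ' :: padRchars p.1.toList 12 ++ (counts.map pvCell).flatten)]))
      (List.replicate serviceList.length (0 : Int), lines)
    res.2 ++ [String.ofList (' ' :: ' ' :: padRchars "TOTAL".toList 12 ++ (res.1.map pvTCell).flatten), ""]

-- ===== PRECONDITION & SPEC =====
def Spec_section_consultant_coverage_py (features : List (String × List (String × List (String × List (String × List (String × List String)))))) (out : List String) : Prop := out = section_consultant_coverage_py_alt features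
instance (features : List (String × List (String × List (String × List (String × List (String × List String)))))) (out : List String) : Decidable (Spec_section_consultant_coverage_py features out) := by unfold Spec_section_consultant_coverage_py; infer_instance

-- ===== CLAIM (what is proved, stated in full; the proofs are below) =====
def Claim_equal_section_consultant_coverage_py : Prop := ∀ (features : List (String × List (String × List (String × List (String × List (String × List String)))))), Dom_section_consultant_coverage_py features → Spec_section_consultant_coverage_py features (section_consultant_coverage_py features)

-- ===== LEMMAS AND PROOFS =====

-- elementwise sum of two Int lists via zip (Python's [t + c for t, c in zip(totals, counts)])
def zadd (a b : List Int) : List Int := (a.zip b).map (fun q => q.1 + q.2)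

theorem zadd_assoc (a b c : List Int) : zadd (zadd a b) c = zadd a (zadd b c) := by
  induction a generalizing b c with
  | nil => simp [zadd]
  | cons x xs ih =>
    cases b with
    | nil => simp [zadd]
    | cons y ys =>
      cases c with
      | nil => simp [zadd]
      | cons z zs =>
        simpa [zadd, Int.add_assoc] using ih ys zs

theorem zadd_replicate_zero (l : List Int) : zadd (List.replicate l.length 0) l = l := by
  induction l with
  | nil => rfl
  | cons x xs ih => simpa [zadd, List.replicate_succ] using ih

theorem zadd_map_map {α : Type} (L : List α) (f g : α → Int) :
    zadd (L.map f) (L.map g) = L.map (fun s => f s + g s) := by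
  simp [zadd, List.zip_map', List.map_map, Function.comp]

theorem zadd_replicate_zero_right (t0 : List Int) : zadd t0 (List.replicate t0.length 0) = t0 := by
  induction t0 with
  | nil => rfl
  | cons x xs ih => simpa [zadd, List.replicate_succ] using ih

-- the running totals of B equal the per-service column sums
theorem totals_fold {δ α : Type} (L : List α) (c : δ → α → Int) :
    ∀ (ds : List δ) (t0 : List Int), t0.length = L.length →
    ds.foldl (fun t d => zadd t (L.map (c d))) t0
      = zadd t0 (L.map (fun s => (ds.map (fun d => c d s)).sum)) := by
  intro ds
  induction ds with
  | nil =>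
    intro t0 h
    simp only [List.foldl_nil, List.map_nil, List.sum_nil]
    rw [show L.map (fun _ => (0:Int)) = List.replicate t0.length 0 by simp [List.map_const', h]]
    exact (zadd_replicate_zero_right t0).symm
  | cons d rest ih =>
    intro t0 h
    rw [List.foldl_cons, ih _ (by simp [zadd, h]), zadd_assoc, zadd_map_map]
    simp

theorem zip_self_map {α β : Type} (l : List α) (f : α → β) :
    l.zip (l.map f) = l.map (fun x => (x, f x)) := by
  induction l with
  | nil => rfl
  | cons x xs ih => simp [ih]

theorem totals_fold_raw {α : Type} (L : List α) (c : String → α → Int) (ds : List String) :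
    ds.foldl (fun t d => List.map (fun q : Int × Int => q.1 + q.2) (t.zip (L.map (c d)))) (List.replicate L.length 0)
      = L.map (fun s => (ds.map (fun d => c d s)).sum) := by
  have h := totals_fold L c ds (List.replicate L.length 0) (by simp)
  have h2 : zadd (List.replicate L.length 0) (L.map (fun s => (ds.map (fun d => c d s)).sum))
      = L.map (fun s => (ds.map (fun d => c d s)).sum) := by
    have := zadd_replicate_zero (L.map (fun s => (ds.map (fun d => c d s)).sum))
    simpa using this
  simpa only [zadd] using h.trans h2

theorem section_consultant_coverage_py_spec : Claim_equal_section_consultant_coverage_py := by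
  intro features _
  unfold Spec_section_consultant_coverage_py section_consultant_coverage_py section_consultant_coverage_py_alt
  simp only [List.foldl_map]
  set days := PySem.Dict.ofList ((PySem.Dict.ofList features).getD "days" []) with hdays
  set dayKeys := PySem.List.sorted days.keys (fun x => x) false with hdk
  set allServices : PySem.Set String :=
    dayKeys.foldl (fun s d => PySem.Set.update s (pvNbs (days.getD d [])).keys) PySem.Set.empty with has
  set serviceList := PySem.List.sorted (PySem.Set.diff allServices ["_untagged"]) (fun x => x) false with hsl
  by_cases h : serviceList = []
  · simp [h]
  · simp only [if_neg h]
    rw [zip_self_map, List.foldl_map,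
      PySem.List.foldl_prod_mk
        (f := fun (t : List Int) (d : String) =>
          List.map (fun q : Int × Int => q.1 + q.2) (t.zip (serviceList.map (fun svc => (((pvNbs (days.getD d [])).getD svc []).length : Int)))))
        (g := fun (ls : List String) (d : String) =>
          ls ++ [String.ofList (' ' :: ' ' :: padRchars d.toList 12 ++ ((serviceList.map (fun svc => (((pvNbs (days.getD d [])).getD svc []).length : Int))).map pvCell).flatten)])]
    rw [totals_fold_raw serviceList (fun d svc => (((pvNbs (days.getD d [])).getD svc []).length : Int)) dayKeys]
    simp only [PySem.List.foldl_append_singleton_eq_map, PySem.List.foldl_append_eq_flatMap,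
      List.flatMap_def, List.map_map, Function.comp_def]
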